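-- pv_equiv track=rewrite | github.com/n1k9/advent-of-code | AoC2021/python/day03-2.py | CO2_scrubber_rating
-- ===== SOURCE A (Python) =====
-- def counter_zeros_ones(dagnostics: list[str], position: int) -> (int, int):
--     count_ones = 0
--     # n_lines = len(dagnostics)
--     for line in dagnostics:
--         if line[position] == '1':
--             count_ones += 1
--     return len(dagnostics) - count_ones, count_ones
--
-- def least_common(zeros: int, ones:int) -> str:
--     return '1' if ones < zeros else '0'
--
-- def CO2_scrubber_rating(dagnostics: list[str], position=0) :
--     zeros, ones = counter_zeros_ones(dagnostics, position)
--     least_common_bit = least_common(zeros, ones)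
--     rest = list(filter(lambda x: x[position] == least_common_bit, dagnostics))
--     if len(rest) > 1:
--         return CO2_scrubber_rating(rest, position=position+1)
--     else:
--         return rest[0].strip()
-- ===== SOURCE B (Python) =====
-- def CO2_scrubber_rating(dagnostics: list[str], position=0):
--     # Iterative version: one loop maintaining the candidate list; filter first,
--     # then test (do-while), with the tie-break inlined as 2*ones < len.
--     candidates = dagnostics
--     while True:
--         ones = sum(1 for line in candidates if line[position] == '1')
--         bit = '1' if 2 * ones < len(candidates) else '0'
--         candidates = [line for line in candidates if line[position] == bit]
--         position += 1
--         if len(candidates) <= 1: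
--             return candidates[0].strip()
-- ===== Notes on version B (the rewrite author's own statement) =====
-- stated objective: simpler
-- what changed: The tail recursion with two helper functions is replaced by a single iterative while-loop that maintains the candidate list, with the one-count and the 2*ones<len tie-break inlined; equality is proved on every input where A returns.
import Mathlib
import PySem

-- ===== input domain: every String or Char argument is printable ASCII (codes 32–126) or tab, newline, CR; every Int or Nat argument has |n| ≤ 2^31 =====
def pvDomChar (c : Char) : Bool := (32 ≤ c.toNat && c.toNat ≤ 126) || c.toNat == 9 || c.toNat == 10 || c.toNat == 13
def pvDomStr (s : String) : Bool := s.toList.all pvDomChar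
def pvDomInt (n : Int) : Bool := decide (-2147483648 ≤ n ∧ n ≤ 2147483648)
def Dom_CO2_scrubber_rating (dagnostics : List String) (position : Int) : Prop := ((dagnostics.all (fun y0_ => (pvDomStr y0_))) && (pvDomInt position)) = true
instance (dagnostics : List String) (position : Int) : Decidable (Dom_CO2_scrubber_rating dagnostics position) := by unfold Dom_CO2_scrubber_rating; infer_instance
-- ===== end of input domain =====

-- B rewrites A's tail recursion (two helper functions + recursive call) as a single
-- filter-first iterative loop with the 2*ones<len tie-break inlined; equal return values
-- are proved on Pre_ below (exactly the inputs on which A returns instead of raising).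

-- ===== PORT A =====
-- for line in dagnostics: if line[position] == '1': count_ones += 1
-- (an out-of-range index raises in Python; the port's pyGet? comparison is just false
--  there, such inputs are excluded by Pre_)
def pvCountOnesA (dagnostics : List String) (position : Int) : Int :=
  dagnostics.foldl (fun acc line => if PySem.Str.pyGet? line position = some '1' then acc + 1 else acc) 0

def pvCounterZerosOnes (dagnostics : List String) (position : Int) : Int × Int :=
  let count_ones := pvCountOnesA dagnostics position
  ((dagnostics.length : Int) - count_ones, count_ones)

def pvLeastCommon (zeros : Int) (ones : Int) : Char :=
  if ones < zeros then '1' else '0'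

-- list(filter(lambda x: x[position] == least_common_bit, dagnostics))
def pvRestA (dagnostics : List String) (position : Int) : List String :=
  dagnostics.filter (fun x =>
    PySem.Str.pyGet? x position
      = some (pvLeastCommon (pvCounterZerosOnes dagnostics position).1 (pvCounterZerosOnes dagnostics position).2))

-- A's foldl one-counter computes a countP (needed by the termination lemma, cited there)
theorem pvCountOnesA_eq_countP (dagnostics : List String) (position : Int) :
    pvCountOnesA dagnostics position = ((dagnostics.countP (fun line => PySem.Str.pyGet? line position = some '1')) : Int) := by
  unfold pvCountOnesA
  have h : ∀ (l : List String) (acc : Int),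
      l.foldl (fun acc line => if PySem.Str.pyGet? line position = some '1' then acc + 1 else acc) acc
        = acc + ((l.countP (fun line => PySem.Str.pyGet? line position = some '1')) : Int) := by
    intro l
    induction l with
    | nil => intro acc; simp
    | cons y ys ih =>
      intro acc
      rw [List.foldl_cons, List.countP_cons, ih]
      by_cases hy : PySem.Str.pyGet? y position = some '1'
      · rw [if_pos hy, if_pos (decide_eq_true hy)]
        push_cast; ring
      · rw [if_neg hy, if_neg (by simpa using hy)]
        push_cast; ring
  rw [h]; ring

-- A's least-common bit is B's inlined tie-break (also needed for termination)
theorem pvBit_eq (dagnostics : List String) (position : Int) :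
    pvLeastCommon (pvCounterZerosOnes dagnostics position).1 (pvCounterZerosOnes dagnostics position).2
      = (if 2 * ((dagnostics.countP (fun l => PySem.Str.pyGet? l position = some '1')) : Int) < (dagnostics.length : Int) then '1' else '0') := by
  unfold pvLeastCommon pvCounterZerosOnes
  simp only
  rw [pvCountOnesA_eq_countP]
  set c := ((dagnostics.countP (fun l => PySem.Str.pyGet? l position = some '1')) : Int)
  have : (c < (dagnostics.length : Int) - c) ↔ (2 * c < (dagnostics.length : Int)) := by omega
  split_ifs with h1 h2 h2 <;> first | rfl | (exact absurd (this.mp h1) h2) | (exact absurd (this.mpr h2) h1)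

-- termination lemma, shared by both ports: when the kept bit is the least-common one and
-- the filtered list still has > 1 element, it is strictly shorter than the input list
theorem pvFilterBitShorter (dagnostics : List String) (position : Int) (bit : Char)
    (hbit : bit = (if 2 * ((dagnostics.countP (fun l => PySem.Str.pyGet? l position = some '1')) : Int) < (dagnostics.length : Int) then '1' else '0'))
    (h : 1 < (dagnostics.filter (fun x => PySem.Str.pyGet? x position = some bit)).length) :
    (dagnostics.filter (fun x => PySem.Str.pyGet? x position = some bit)).length < dagnostics.length := by
  by_contra hge
  rw [not_lt] at hge
  have hle := List.length_filter_le (fun x => decide (PySem.Str.pyGet? x position = some bit)) dagnostics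
  have heq : (dagnostics.filter (fun x => decide (PySem.Str.pyGet? x position = some bit))).length = dagnostics.length :=
    le_antisymm hle hge
  have hall : ∀ x ∈ dagnostics, PySem.Str.pyGet? x position = some bit := by
    intro x hx
    exact of_decide_eq_true (List.length_filter_eq_length_iff.mp heq x hx)
  have hlen2 : 2 ≤ dagnostics.length := by omega
  have hcnt : dagnostics.countP (fun l => PySem.Str.pyGet? l position = some '1')
      = (if bit = '1' then dagnostics.length else 0) := by
    by_cases hb : bit = '1'
    · rw [if_pos hb, List.countP_eq_length]
      intro x hx; exact decide_eq_true (hb ▸ hall x hx)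
    · rw [if_neg hb, List.countP_eq_zero]
      intro x hx
      simp only [decide_eq_true_eq, hall x hx, Option.some.injEq]
      exact fun hc => hb hc
  by_cases hb : bit = '1'
  · rw [hcnt, if_pos hb] at hbit
    rw [hb] at hbit
    split_ifs at hbit with hlt
    · omega
    · exact absurd hbit (by decide)
  · rw [hcnt, if_neg hb] at hbit
    split_ifs at hbit with hlt
    · exact hb hbit
    · push_cast at hlt; omega

theorem pvRestShorter (dagnostics : List String) (position : Int)
    (h : 1 < (pvRestA dagnostics position).length) :
    (pvRestA dagnostics position).length < dagnostics.length := by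
  unfold pvRestA at h ⊢
  exact pvFilterBitShorter dagnostics position _ (pvBit_eq dagnostics position) h

def CO2_scrubber_rating (dagnostics : List String) (position : Int) : String :=
  let rest := pvRestA dagnostics position
  if h : 1 < rest.length then
    CO2_scrubber_rating rest (position + 1)
  else
    PySem.Str.strip (rest.headD "")   -- rest[0]; the empty case raises in Python, excluded by Pre_
termination_by dagnostics.length
decreasing_by exact pvRestShorter dagnostics position h

-- ===== PORT B =====
-- one loop step: count the ones, pick the bit by the inlined 2*ones < len tie-break, filter
def pvStepB (candidates : List String) (position : Int) : List String :=
  candidates.filter (fun line =>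
    PySem.Str.pyGet? line position
      = some (if 2 * ((candidates.countP (fun l => PySem.Str.pyGet? l position = some '1')) : Int) < (candidates.length : Int) then '1' else '0'))

theorem pvStepShorter (l : List String) (p : Int) (h : 1 < (pvStepB l p).length) :
    (pvStepB l p).length < l.length := by
  unfold pvStepB at h ⊢
  exact pvFilterBitShorter l p _ rfl h

-- while True: filter first (one pvStepB step), position += 1, stop as soon as ≤ 1 remain
def CO2_scrubber_rating_alt (dagnostics : List String) (position : Int) : String :=
  let candidates := pvStepB dagnostics position
  if h : candidates.length ≤ 1 then
    PySem.Str.strip (candidates.headD "")   -- candidates[0]; empty case raises in Python, excluded by Pre_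
  else
    CO2_scrubber_rating_alt candidates (position + 1)
termination_by dagnostics.length
decreasing_by
  have h' : ¬ (pvStepB dagnostics position).length ≤ 1 := h
  exact pvStepShorter dagnostics position (by omega)

-- ===== PRECONDITION & SPEC =====
-- pvMinor S q: the least-common character A keeps among the candidates S at column q
-- ('1' when strictly fewer lines carry '1' there than not, else '0'); pvSel C q k: the
-- candidate lines still alive after k filtering rounds starting at column q.
def pvMinor (S : List String) (q : Int) : Char :=
  if 2 * ((S.map (fun t => PySem.Str.pyGet? t q)).count (some '1') : Int) < (S.length : Int) then '1' else '0'

def pvSel (C : List String) (q : Int) : Nat → List String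
  | 0 => C
  | j+1 => (pvSel C q j).filter (fun t => PySem.Str.pyGet? t (q + j) = some (pvMinor (pvSel C q j) (q + j)))

-- Pre_ holds exactly when A returns instead of raising: some round k ≥ 1 leaves exactly one
-- candidate line, every earlier round still has more than one (so the cascade has not stopped)
-- and every line alive at an earlier round is long enough to be indexed there (no IndexError).
def Pre_CO2_scrubber_rating (dagnostics : List String) (position : Int) : Prop :=
  ∃ k ∈ List.range (dagnostics.length + 1),
    1 ≤ k ∧ (pvSel dagnostics position k).length = 1 ∧
    ∀ j ∈ List.range k,
      (∀ t ∈ pvSel dagnostics position j, (PySem.Str.pyGet? t (position + (j : Int))).isSome) ∧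
      (j = 0 ∨ 1 < (pvSel dagnostics position j).length)

instance (dagnostics : List String) (position : Int) : Decidable (Pre_CO2_scrubber_rating dagnostics position) := by
  unfold Pre_CO2_scrubber_rating; infer_instance

def pvWitness_CO2_scrubber_rating : List String × Int := (["00", "01", "10", "11"], 0)

def Spec_CO2_scrubber_rating (dagnostics : List String) (position : Int) (out : String) : Prop := out = CO2_scrubber_rating_alt dagnostics position
instance (dagnostics : List String) (position : Int) (out : String) : Decidable (Spec_CO2_scrubber_rating dagnostics position out) := by unfold Spec_CO2_scrubber_rating; infer_instance

-- ===== CLAIM (what is proved, stated in full; the proofs are below) =====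
def Claim_equal_CO2_scrubber_rating : Prop := ∀ (dagnostics : List String) (position : Int), Dom_CO2_scrubber_rating dagnostics position → Pre_CO2_scrubber_rating dagnostics position → Spec_CO2_scrubber_rating dagnostics position (CO2_scrubber_rating dagnostics position)

-- ===== LEMMAS AND PROOFS =====

-- the two ports perform the same filter step and the same stop test, so they agree on
-- EVERY input (Pre_ is needed only so the theorem speaks of inputs where the Pythons return)
theorem pvEqAll (l : List String) (p : Int) :
    CO2_scrubber_rating l p = CO2_scrubber_rating_alt l p := by
  have hsame : pvRestA l p = pvStepB l p := by
    unfold pvRestA pvStepB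
    rw [pvBit_eq]
  rw [CO2_scrubber_rating, CO2_scrubber_rating_alt]
  by_cases h : 1 < (pvStepB l p).length
  · rw [hsame, dif_pos h, dif_neg (by omega)]
    exact pvEqAll (pvStepB l p) (p + 1)
  · rw [hsame, dif_neg h, dif_pos (by omega)]
termination_by l.length
decreasing_by exact pvStepShorter l p h

-- ===== VERDICT (by name: the statement is the Claim_ definition above) =====
theorem CO2_scrubber_rating_spec : Claim_equal_CO2_scrubber_rating := by
  intro dagnostics position _ _
  unfold Spec_CO2_scrubber_rating
  exact pvEqAll dagnostics position
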